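-- pv_equiv track=rewrite | github.com/cmin0717/Algorithm | 2023-05(백준,프로그래머스)/단어 퍼즐.py | solution
-- ===== SOURCE A (Python) =====
-- from collections import deque
--
-- def solution(strs, t):
--
--     strs, q, n = set(strs), deque(), len(t)
--
--     part = ''
--     for i in t:
--         part += i
--         if part in strs:
--             q.append([1, part])
--
--     visit = [False] * n
--     while q:
--         cnt, word = q.popleft()
--
--         if word == t:
--             return cnt
--
--         word_rest = ''
--         for i in range(len(word), min(n, len(word)+5)):
--             word_rest += t[i]
--             if word_rest in strs:
--                 new_word = word + word_rest
--                 if not visit[i]: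
--                     visit[i] = True
--                     q.append([cnt+1, new_word])
--
--     return -1
-- ===== SOURCE B (Python) =====
-- def solution(strs, t):
--     words = set(strs)
--     n = len(t)
--     frontier = [j for j in range(1, n + 1) if t[:j] in words]
--     seen = [False] * (n + 1)
--     depth = 1
--     while frontier:
--         if n in frontier:
--             return depth
--         nxt = []
--         for p in frontier:
--             for j in range(p + 1, min(n, p + 5) + 1):
--                 if t[p:j] in words and not seen[j]:
--                     seen[j] = True
--                     nxt.append(j)
--         frontier = nxt
--         depth += 1
--     return -1
-- ===== Notes on version B (the rewrite author's own statement) =====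
-- stated objective: faster
-- what changed: Replaces the deque-of-[count, word-string] BFS by a layer-by-layer frontier BFS over integer end-positions: no length-n string concatenations or word==t comparisons per queue entry, only at-most-5-character slice lookups and one membership test of n per layer.
import Mathlib
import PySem

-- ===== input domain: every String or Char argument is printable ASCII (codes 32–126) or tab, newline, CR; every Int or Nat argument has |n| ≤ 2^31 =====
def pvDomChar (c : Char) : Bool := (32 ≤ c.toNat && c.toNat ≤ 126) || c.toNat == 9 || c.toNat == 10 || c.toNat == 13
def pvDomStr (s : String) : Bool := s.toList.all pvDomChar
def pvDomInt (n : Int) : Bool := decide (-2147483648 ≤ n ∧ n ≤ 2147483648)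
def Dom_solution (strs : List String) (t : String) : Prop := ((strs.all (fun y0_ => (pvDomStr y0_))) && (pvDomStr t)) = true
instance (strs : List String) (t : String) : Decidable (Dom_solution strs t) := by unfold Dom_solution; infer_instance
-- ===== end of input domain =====

-- B replaces A's deque of [count, word-string] BFS states by a layered frontier BFS over
-- integer end-positions (alternative algorithmic structure; return value proved identical).
-- In both ports the Python bool lists visit/seen are modelled as Nat-indexed stores (Nat → Bool),
-- Python strings are handled as their character lists (String ↔ List Char bridge), and each
-- while loop carries an explicit fuel parameter that provably exceeds its iteration count
-- (each iteration either pops the queue/frontier or marks a fresh visit/seen index).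

-- ===== PORT A =====
-- A's inner loop: for i in range(len(word), min(n, len(word)+5)):
--   word_rest += t[i]; if word_rest in strs: new_word = word+word_rest;
--   if not visit[i]: visit[i] = True; q.append([cnt+1, new_word])
-- (t[i] is always in range here, hence the total getD access)
def pvExtendA (cs : List Char) (words : PySem.Set String) (cnt : Int) (word : List Char) :
    List Nat → List Char → (Nat → Bool) → List (Int × List Char) → ((Nat → Bool) × List (Int × List Char))
  | [], _, visit, q => (visit, q)
  | i :: is, rest, visit, q =>
    let rest' := rest ++ [cs.getD i ' ']
    if PySem.Set.contains words (String.ofList rest') then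
      if !(visit i) then
        pvExtendA cs words cnt word is rest' (Function.update visit i true) (q ++ [(cnt + 1, word ++ rest')])
      else
        pvExtendA cs words cnt word is rest' visit q
    else
      pvExtendA cs words cnt word is rest' visit q

-- A's while loop over the deque q (fuel exceeds the iteration count, see header)
def pvLoopA (cs : List Char) (words : PySem.Set String) :
    Nat → List (Int × List Char) → (Nat → Bool) → Int
  | 0, _, _ => -1
  | _ + 1, [], _ => -1
  | fuel + 1, (cnt, word) :: q, visit =>
    if word = cs then cnt
    else
      let r := pvExtendA cs words cnt word
        (List.range' word.length (min cs.length (word.length + 5) - word.length)) [] visit q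
      pvLoopA cs words fuel r.2 r.1

-- A's first loop: part = ''; for i in t: part += i; if part in strs: q.append([1, part])
def pvInitA (words : PySem.Set String) : List Char → List Char → List (Int × List Char) → List (Int × List Char)
  | [], _, q => q
  | c :: rest, part, q =>
    let part' := part ++ [c]
    pvInitA words rest part'
      (if PySem.Set.contains words (String.ofList part') then q ++ [(1, part')] else q)

def solution (strs : List String) (t : String) : Int :=
  let words := PySem.Set.ofList strs
  let cs := t.toList
  let q := pvInitA words cs [] []
  pvLoopA cs words (2 * (cs.length + q.length) + 2) q (fun _ => false)

-- ===== PORT B =====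
-- B's innermost loop: for j in range(p+1, min(n,p+5)+1):
--   if t[p:j] in words and not seen[j]: seen[j] = True; nxt.append(j)
def pvExtendB (cs : List Char) (words : PySem.Set String) (p : Nat) :
    List Nat → (Nat → Bool) → List Nat → ((Nat → Bool) × List Nat)
  | [], seen, nxt => (seen, nxt)
  | j :: js, seen, nxt =>
    if PySem.Set.contains words (String.ofList (PySem.List.slice cs (some (p : Int)) (some (j : Int)))) && !(seen j) then
      pvExtendB cs words p js (Function.update seen j true) (nxt ++ [j])
    else
      pvExtendB cs words p js seen nxt

-- B's middle loop: for p in frontier: …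
def pvLayerB (cs : List Char) (words : PySem.Set String) :
    List Nat → (Nat → Bool) → List Nat → ((Nat → Bool) × List Nat)
  | [], seen, nxt => (seen, nxt)
  | p :: ps, seen, nxt =>
    let r := pvExtendB cs words p (List.range' (p + 1) (min cs.length (p + 5) + 1 - (p + 1))) seen nxt
    pvLayerB cs words ps r.1 r.2

-- B's while loop: one layer (depth) at a time (fuel exceeds the layer count, see header)
def pvLoopB (cs : List Char) (words : PySem.Set String) :
    Nat → List Nat → (Nat → Bool) → Int → Int
  | 0, _, _, _ => -1
  | _ + 1, [], _, _ => -1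
  | fuel + 1, p :: ps, seen, depth =>
    if (p :: ps).contains cs.length then depth
    else
      let r := pvLayerB cs words (p :: ps) seen []
      pvLoopB cs words fuel r.2 r.1 (depth + 1)

def solution_alt (strs : List String) (t : String) : Int :=
  let words := PySem.Set.ofList strs
  let cs := t.toList
  let frontier := (List.range' 1 cs.length).filter
    (fun (j : Nat) => PySem.Set.contains words (String.ofList (PySem.List.slice cs none (some (j : Int)))))
  pvLoopB cs words (cs.length + 1 + frontier.length + 1) frontier (fun _ => false) 1

-- ===== PRECONDITION & SPEC =====
def Spec_solution (strs : List String) (t : String) (out : Int) : Prop := out = solution_alt strs t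
instance (strs : List String) (t : String) (out : Int) : Decidable (Spec_solution strs t out) := by unfold Spec_solution; infer_instance

-- ===== CLAIM (what is proved, stated in full; the proofs are below) =====
def Claim_equal_solution : Prop := ∀ (strs : List String) (t : String), Dom_solution strs t → Spec_solution strs t (solution strs t)

-- ===== LEMMAS AND PROOFS =====

-- number of indices < n not yet marked true (the loop-progress measure of both whiles)
def pvCountF (n : Nat) (v : Nat → Bool) : Nat := (List.range n).countP (fun i => !(v i))

theorem pvCountF_update (n i : Nat) (v : Nat → Bool) (hi : i < n) (hv : v i = false) :
    pvCountF n (Function.update v i true) + 1 = pvCountF n v := by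
  induction n with
  | zero => omega
  | succ m ih =>
    have hsplit : ∀ (w : Nat → Bool), pvCountF (m+1) w = pvCountF m w + (if w m then 0 else 1) := by
      intro w
      simp [pvCountF, List.range_succ, List.countP_append]
      cases h : w m <;> simp
    rw [hsplit, hsplit]
    rcases Nat.lt_or_ge i m with h | h
    · have hne : m ≠ i := by omega
      rw [Function.update_of_ne hne]
      have := ih h
      omega
    · have him : i = m := by omega
      subst him
      have hcong : pvCountF i (Function.update v i true) = pvCountF i v := by
        unfold pvCountF
        apply List.countP_congr
        intro x hx
        have hxne : x ≠ i := by have := List.mem_range.mp hx; omega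
        rw [Function.update_of_ne hxne]
      rw [hcong, Function.update_self, hv]
      simp

-- A's queue always holds (count, prefix-of-t) pairs: the current BFS layer P (count k),
-- then the partially built next layer Q (count k+1), each position p encoded as cs.take p.
def pvEnc (cs : List Char) (k : Int) (P Q : List Nat) : List (Int × List Char) :=
  P.map (fun p => (k, cs.take p)) ++ Q.map (fun p => (k + 1, cs.take p))

theorem pvEnc_nil (cs : List Char) (k : Int) (Q : List Nat) :
    pvEnc cs k [] Q = pvEnc cs (k + 1) Q [] := by simp [pvEnc]

theorem pvEnc_cons (cs : List Char) (k : Int) (p : Nat) (P Q : List Nat) :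
    pvEnc cs k (p :: P) Q = (k, cs.take p) :: pvEnc cs k P Q := by simp [pvEnc]

theorem pvEnc_append (cs : List Char) (k : Int) (P Q D : List Nat) :
    pvEnc cs k P Q ++ D.map (fun j => (k + 1, cs.take j)) = pvEnc cs k P (Q ++ D) := by
  simp [pvEnc]

theorem pvTake_snoc (cs : List Char) (p i : Nat) (hpi : p ≤ i) (hi : i < cs.length) :
    (cs.drop p).take (i - p) ++ [cs.getD i ' '] = (cs.drop p).take (i - p + 1) := by
  rw [List.take_add_one]
  congr 1
  rw [List.getElem?_drop]
  have hpip : p + (i - p) = i := by omega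
  rw [hpip, List.getD_eq_getElem?_getD]
  cases h : cs[i]? with
  | none => rw [List.getElem?_eq_none_iff] at h; omega
  | some c => simp

-- one dequeued entry (k, cs.take p): A's inner string-building loop appends exactly the
-- positions Δ that B's slice-testing loop appends, flipping the same visit/seen marks
theorem pvExt_sim (cs : List Char) (words : PySem.Set String) (k : Int) (p : Nat) :
    ∀ (m i : Nat) (v s : Nat → Bool) (q : List (Int × List Char)) (nxt : List Nat),
      p ≤ i → i + m ≤ cs.length → (∀ x, s (x + 1) = v x) →
      ∃ (D : List Nat) (v' s' : Nat → Bool),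
        pvExtendA cs words k (cs.take p) (List.range' i m) ((cs.drop p).take (i - p)) v q
          = (v', q ++ D.map (fun j => (k + 1, cs.take j))) ∧
        pvExtendB cs words p (List.range' (i + 1) m) s nxt = (s', nxt ++ D) ∧
        (∀ x, s' (x + 1) = v' x) ∧
        pvCountF cs.length v' + D.length = pvCountF cs.length v ∧
        pvCountF (cs.length + 1) s' + D.length = pvCountF (cs.length + 1) s ∧
        (∀ j ∈ D, i + 1 ≤ j ∧ j ≤ i + m) := by
  intro m
  induction m with
  | zero =>
    intro i v s q nxt _ _ hlink
    exact ⟨[], v, s, by simp [List.range'_zero, pvExtendA],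
      by simp [List.range'_zero, pvExtendB], hlink, by simp, by simp, by simp⟩
  | succ m ih =>
    intro i v s q nxt hpi him hlink
    have hi : i < cs.length := by omega
    have hsnoc := pvTake_snoc cs p i hpi hi
    have hip : i + 1 - p = i - p + 1 := by omega
    have hslice : PySem.List.slice cs (some ((p : Nat) : Int)) (some (((i + 1 : Nat)) : Int))
        = (cs.drop p).take (i - p + 1) := by
      rw [PySem.List.slice_natCast, hip]
    rw [List.range'_succ, List.range'_succ]
    simp only [pvExtendA, pvExtendB, hsnoc, hslice, hlink i]
    by_cases hc : PySem.Set.contains words (String.ofList ((cs.drop p).take (i - p + 1))) = true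
    · by_cases hv : v i = false
      · -- fresh position i+1 appended by both
        have htake : cs.take p ++ (cs.drop p).take (i - p + 1) = cs.take (i + 1) := by
          rw [← List.take_add]
          congr 1
          omega
        have hlink' : ∀ x, Function.update s (i + 1) true (x + 1) = Function.update v i true x := by
          intro x
          by_cases hx : x = i
          · subst hx; simp
          · rw [Function.update_of_ne (by omega), Function.update_of_ne hx]; exact hlink x
        obtain ⟨D, v', s', hA, hB, hl, hcf, hcfB, hbnd⟩ :=
          ih (i + 1) (Function.update v i true) (Function.update s (i + 1) true)
            (q ++ [(k + 1, cs.take (i + 1))]) (nxt ++ [i + 1]) (by omega) (by omega) hlink'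
        rw [hip] at hA
        refine ⟨(i + 1) :: D, v', s', ?_, ?_, hl, ?_, ?_, ?_⟩
        · simp only [hc, hv, Bool.not_false, htake, if_pos]
          rw [hA]
          simp
        · simp only [hc, hv, Bool.not_false, Bool.and_true, if_pos]
          rw [hB]
          simp
        · have hupd := pvCountF_update cs.length i v hi hv
          simp only [List.length_cons]
          omega
        · have hsv : s (i + 1) = false := by rw [hlink i]; exact hv
          have hupd := pvCountF_update (cs.length + 1) (i + 1) s (by omega) hsv
          simp only [List.length_cons]
          omega
        · intro j hj
          rcases List.mem_cons.mp hj with h | h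
          · omega
          · have := hbnd j h; omega
      · -- already seen: both skip
        have hvt : v i = true := by simpa using hv
        obtain ⟨D, v', s', hA, hB, hl, hcf, hcfB, hbnd⟩ :=
          ih (i + 1) v s q nxt (by omega) (by omega) hlink
        rw [hip] at hA
        refine ⟨D, v', s', ?_, ?_, hl, hcf, hcfB, ?_⟩
        · simp only [hc, hvt, Bool.not_true, if_true]
          exact hA
        · simp only [hc, hvt, Bool.not_true, Bool.and_false]
          exact hB
        · intro j hj; have := hbnd j hj; omega
    · -- substring not a word: both skip
      obtain ⟨D, v', s', hA, hB, hl, hcf, hcfB, hbnd⟩ :=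
        ih (i + 1) v s q nxt (by omega) (by omega) hlink
      rw [hip] at hA
      refine ⟨D, v', s', ?_, ?_, hl, hcf, hcfB, ?_⟩
      · simp only [hc]
        exact hA
      · simp only [hc, Bool.false_and]
        exact hB
      · intro j hj; have := hbnd j hj; omega

-- an arbitrary surrogate seen-store matching a visit-store (used where only A's side matters)
def pvShift (v : Nat → Bool) : Nat → Bool := fun x => match x with | 0 => false | y + 1 => v y

theorem pvShift_link (v : Nat → Bool) : ∀ x, pvShift v (x + 1) = v x := fun _ => rfl

theorem pvTake_ne (cs : List Char) (p : Nat) (h : p < cs.length) : cs.take p ≠ cs := by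
  intro he
  have := congrArg List.length he
  simp [List.length_take] at this
  omega

-- once the target position cs.length is in the encoded queue, A dequeues entries (never
-- re-checking other words against t) until it pops it and returns its layer count
theorem pvRet (cs : List Char) (words : PySem.Set String) :
    ∀ (W : Nat) (P Q : List Nat) (v : Nat → Bool) (k : Int) (N : Nat),
      2 * (pvCountF cs.length v + P.length + Q.length) + (if P = [] then 1 else 0) ≤ W →
      2 * (pvCountF cs.length v + P.length + Q.length) + (if P = [] then 1 else 0) ≤ N →
      (∀ p ∈ P, p ≤ cs.length) → (∀ p ∈ Q, p ≤ cs.length) →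
      (cs.length ∈ P ∨ cs.length ∈ Q) →
      pvLoopA cs words N (pvEnc cs k P Q) v = if cs.length ∈ P then k else k + 1 := by
  intro W
  induction W using Nat.strong_induction_on with
  | _ W IH =>
    intro P Q v k N hW hN hP hQ hmem
    match P with
    | [] =>
      rcases hmem with h | h
      · simp at h
      · have hQne : Q ≠ [] := by intro he; subst he; simp at h
        rw [pvEnc_nil]
        have := IH (W - 1) (by simp at hW; omega) Q [] v (k + 1) N
          (by simp only [List.length_nil, if_neg hQne]; simp at hW ⊢; omega)
          (by simp only [List.length_nil, if_neg hQne]; simp at hN ⊢; omega)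
          hQ (by simp) (Or.inl h)
        rw [this, if_pos h]
        simp
    | p :: P' =>
      match N with
      | 0 => simp at hN
      | N' + 1 =>
        rw [pvEnc_cons]
        rw [pvLoopA]
        by_cases hpn : p = cs.length
        · subst hpn
          rw [if_pos (List.take_length ..)]
          rw [if_pos (by simp)]
        · have hples : p ≤ cs.length := hP p (by simp)
          have hplt : p < cs.length := by omega
          rw [if_neg (pvTake_ne cs p hplt)]
          have hwl : (cs.take p).length = p := by simp [List.length_take]; omega
          obtain ⟨D, v', s', hA, _, _, hcf, _, hbnd⟩ :=
            pvExt_sim cs words k p (min cs.length (p + 5) - p) p v (pvShift v)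
              (pvEnc cs k P' Q) [] (le_refl p) (by omega) (pvShift_link v)
          rw [Nat.sub_self, List.take_zero] at hA
          rw [hwl]
          simp only [hA]
          rw [pvEnc_append]
          have hmem' : cs.length ∈ P' ∨ cs.length ∈ Q ++ D := by
            rcases hmem with h | h
            · rcases List.mem_cons.mp h with h | h
              · omega
              · exact Or.inl h
            · exact Or.inr (List.mem_append_left _ h)
          have hres := IH (W - 1) (by simp at hW; omega) P' (Q ++ D) v' k N'
            (by
              simp only [List.length_append]
              simp at hW
              split_ifs <;> omega)
            (by
              simp only [List.length_append]
              simp at hN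
              split_ifs <;> omega)
            (fun x hx => hP x (by simp [hx]))
            (by
              intro x hx
              rcases List.mem_append.mp hx with h | h
              · exact hQ x h
              · have := hbnd x h; omega)
            hmem'
          rw [hres]
          by_cases hf : cs.length ∈ P'
          · rw [if_pos hf, if_pos (by simp [hf])]
          · rw [if_neg hf, if_neg (by simp [List.mem_cons]; exact ⟨fun h => hpn h.symm, hf⟩)]

-- main simulation: A's deque run from a layer-boundary-encoded queue equals B's layered
-- run, layer by layer (P = rest of current layer, Q = next layer built so far)
theorem pvMain (cs : List Char) (words : PySem.Set String) :
    ∀ (W : Nat) (P Q : List Nat) (v s : Nat → Bool) (k : Int) (N M : Nat),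
      2 * (pvCountF cs.length v + P.length + Q.length) + (if P = [] then 1 else 0) ≤ W →
      2 * (pvCountF cs.length v + P.length + Q.length) + (if P = [] then 1 else 0) ≤ N →
      pvCountF (cs.length + 1) s + Q.length < M →
      (∀ p ∈ P, p ≤ cs.length) → (∀ p ∈ Q, p ≤ cs.length) →
      cs.length ∉ P →
      (∀ x, s (x + 1) = v x) →
      pvLoopA cs words N (pvEnc cs k P Q) v
        = pvLoopB cs words M (pvLayerB cs words P s Q).2 (pvLayerB cs words P s Q).1 (k + 1) := by
  intro W
  induction W using Nat.strong_induction_on with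
  | _ W IH =>
    intro P Q v s k N M hW hN hM hP hQ hnP hlink
    match P with
    | [] =>
      simp only [pvLayerB]
      rw [pvEnc_nil]
      match hQ2 : Q with
      | [] =>
        match N, M with
        | 0, 0 => rfl
        | 0, _ + 1 => rw [pvLoopA, pvLoopB]
        | _ + 1, 0 => simp [pvEnc, pvLoopA, pvLoopB]
        | _ + 1, _ + 1 => simp [pvEnc, pvLoopA, pvLoopB]
      | x :: Q' =>
        match M with
        | 0 => omega
        | M' + 1 =>
          rw [pvLoopB]
          by_cases hmem : cs.length ∈ x :: Q'
          · rw [if_pos (by rw [List.contains_iff_mem]; exact hmem)]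
            have := pvRet cs words
              (2 * (pvCountF cs.length v + (x :: Q').length))
              (x :: Q') [] v (k + 1) N
              (by simp) (by simp at hN ⊢; omega) hQ (by simp) (Or.inl hmem)
            rw [this, if_pos hmem]
          · rw [if_neg (by rw [List.contains_iff_mem]; exact hmem)]
            have := IH (W - 1) (by simp at hW; omega) (x :: Q') [] v s (k + 1) N M'
              (by simp at hW ⊢; omega) (by simp at hN ⊢; omega)
              (by simp at hM ⊢; omega)
              hQ (by simp) hmem hlink
            rw [this]
    | p :: P' =>
      have hpn : p ≠ cs.length := fun h => hnP (by simp [h])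
      have hples : p ≤ cs.length := hP p (by simp)
      have hplt : p < cs.length := by omega
      match N with
      | 0 => simp at hN
      | N' + 1 =>
        rw [pvEnc_cons, pvLoopA, if_neg (pvTake_ne cs p hplt)]
        have hwl : (cs.take p).length = p := by simp [List.length_take]; omega
        obtain ⟨D, v', s', hA, hB, hl, hcf, hcfB, hbnd⟩ :=
          pvExt_sim cs words k p (min cs.length (p + 5) - p) p v s
            (pvEnc cs k P' Q) Q (le_refl p) (by omega) hlink
        rw [Nat.sub_self, List.take_zero] at hA
        rw [hwl]
        simp only [hA]
        rw [pvEnc_append]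
        have hstep : pvLayerB cs words (p :: P') s Q = pvLayerB cs words P' s' (Q ++ D) := by
          rw [pvLayerB]
          have hcnt : min cs.length (p + 5) + 1 - (p + 1) = min cs.length (p + 5) - p := by omega
          rw [hcnt, hB]
        rw [hstep]
        have hW' : 2 * (pvCountF cs.length v + (p :: P').length + Q.length) ≤ W := by
          simp only [List.cons_ne_nil, if_false] at hW
          omega
        have hN' : 2 * (pvCountF cs.length v + (p :: P').length + Q.length) ≤ N' + 1 := by
          simp only [List.cons_ne_nil, if_false] at hN
          omega
        exact IH (W - 1) (by simp at hW'; omega) P' (Q ++ D) v' s' k N' M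
          (by
            simp only [List.length_append]
            simp at hW'
            split_ifs <;> omega)
          (by
            simp only [List.length_append]
            simp at hN'
            split_ifs <;> omega)
          (by simp only [List.length_append]; omega)
          (fun x hx => hP x (by simp [hx]))
          (by
            intro x hx
            rcases List.mem_append.mp hx with h | h
            · exact hQ x h
            · have := hbnd x h; omega)
          (fun h => hnP (by simp [h]))
          hl

-- a whole run from a layer start: A's deque equals B's while loop
theorem pvTop (cs : List Char) (words : PySem.Set String) :
    ∀ (N M : Nat) (F : List Nat) (v s : Nat → Bool) (k : Int),
      2 * (pvCountF cs.length v + F.length) + 1 ≤ N →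
      pvCountF (cs.length + 1) s + F.length < M →
      (∀ p ∈ F, p ≤ cs.length) →
      (∀ x, s (x + 1) = v x) →
      pvLoopA cs words N (pvEnc cs k F []) v = pvLoopB cs words M F s k := by
  intro N M F v s k hN hM hF hlink
  match M with
  | 0 => omega
  | M' + 1 =>
    match F with
    | [] =>
      match N with
      | 0 => simp at hN
      | _ + 1 => simp [pvEnc, pvLoopA, pvLoopB]
    | x :: F' =>
      rw [pvLoopB]
      by_cases hmem : cs.length ∈ x :: F'
      · rw [if_pos (by rw [List.contains_iff_mem]; exact hmem)]
        have := pvRet cs words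
          (2 * (pvCountF cs.length v + (x :: F').length))
          (x :: F') [] v k N
          (by simp) (by simp at hN ⊢; omega) hF (by simp) (Or.inl hmem)
        rw [this, if_pos hmem]
      · rw [if_neg (by rw [List.contains_iff_mem]; exact hmem)]
        exact pvMain cs words
          (2 * (pvCountF cs.length v + (x :: F').length) + 1)
          (x :: F') [] v s k N M'
          (by simp) (by simp at hN ⊢; omega)
          (by simp at hM ⊢; omega)
          hF (by simp) hmem hlink

-- A's prefix-building first loop enqueues exactly B's initial frontier, encoded
theorem pvInit_eq (cs : List Char) (words : PySem.Set String) :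
    ∀ (rest part : List Char) (q : List (Int × List Char)) (p : Nat),
      p ≤ cs.length → part = cs.take p → rest = cs.drop p →
      pvInitA words rest part q
        = q ++ ((List.range' (p + 1) (cs.length - p)).filter
            (fun j => PySem.Set.contains words (String.ofList (cs.take j)))).map
            (fun j => ((1 : Int), cs.take j)) := by
  intro rest
  induction rest with
  | nil =>
    intro part q p hple _ hrest
    have hlen : cs.length - p = 0 := by
      have := congrArg List.length hrest
      simp [List.length_drop] at this
      omega
    rw [hlen]
    simp [pvInitA, List.range'_zero]
  | cons c rest' ih =>
    intro part q p hple hpart hrest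
    have hlen : (cs.drop p).length = rest'.length + 1 := by rw [← hrest]; simp
    have hplt : p < cs.length := by simp [List.length_drop] at hlen; omega
    have hcp : cs[p]? = some c := by
      have h0 : (cs.drop p)[0]? = some c := by rw [← hrest]; simp
      rw [List.getElem?_drop] at h0
      simpa using h0
    have hpart' : part ++ [c] = cs.take (p + 1) := by
      rw [List.take_add_one, hcp, hpart]
      simp
    have hrest' : rest' = cs.drop (p + 1) := by
      have := congrArg List.tail hrest
      simpa [List.tail_drop] using this
    rw [pvInitA]
    have hstep := ih (part ++ [c])
      (if PySem.Set.contains words (String.ofList (part ++ [c])) then q ++ [(1, part ++ [c])] else q)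
      (p + 1) (by omega) hpart' hrest'
    rw [hstep, hpart']
    have hcnt : cs.length - p = (cs.length - (p + 1)) + 1 := by omega
    rw [hcnt, List.range'_succ, List.filter_cons]
    by_cases hc : String.ofList (cs.take (p + 1)) ∈ words
    · simp [hc]
    · simp [hc]

-- ===== VERDICT (by name: the statement is the Claim_ definition above) =====
theorem solution_spec : Claim_equal_solution := by
  unfold Claim_equal_solution
  intro strs t _
  unfold Spec_solution solution solution_alt
  simp only [PySem.List.slice_to_natCast]
  have hinit := pvInit_eq t.toList (PySem.Set.ofList strs) t.toList [] [] 0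
    (by omega) (by simp) (by simp)
  simp only [Nat.sub_zero, Nat.zero_add, List.nil_append] at hinit
  rw [hinit]
  have hEnc : ((List.range' 1 t.toList.length).filter
        (fun j => PySem.Set.contains (PySem.Set.ofList strs) (String.ofList (t.toList.take j)))).map
        (fun j => ((1 : Int), t.toList.take j))
      = pvEnc t.toList 1
          ((List.range' 1 t.toList.length).filter
            (fun j => PySem.Set.contains (PySem.Set.ofList strs) (String.ofList (t.toList.take j)))) [] := by
    simp [pvEnc]
  rw [hEnc]
  apply pvTop
  · simp [pvCountF, pvEnc]
  · simp [pvCountF]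
  · intro j hj
    have := List.mem_range'.mp (List.mem_filter.mp hj).1
    omega
  · intro x
    rfl
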